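-- pv_equiv track=rewrite | github.com/Isaac-D-Dawson/Randoms | Rowntrees.py | tavros
-- ===== SOURCE A (Python) =====
-- def tavros(text: str) -> str:
--     out_val = f"{text[0].lower()}{text[1].upper()}"
--     for i in range(2, len(text)):
--         if text[i-2:i] == ". " or text[i-2:i] == ", ":
--             out_val = f"{out_val}{text[i].lower()}"
--         else:
--             out_val = f"{out_val}{text[i].upper()}"
--     return(out_val)
-- ===== SOURCE B (Python) =====
-- def tavros(text: str) -> str:
--     cuts = [j + 2 for j in range(len(text) - 2) if text[j] in '.,' and text[j + 1] == ' ']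
--     pieces = [text[0].lower(), text[1].upper()]
--     prev = 2
--     for i in cuts:
--         pieces.append(text[prev:i].upper())
--         pieces.append(text[i].lower())
--         prev = i + 1
--     pieces.append(text[prev:].upper())
--     return ''.join(pieces)
-- ===== Notes on version B (the rewrite author's own statement) =====
-- stated objective: faster
-- what changed: B first computes the list of cut positions (characters preceded by '. ' or ', '), then assembles the output from whole uppercased slices between cuts with a single lowercase character at each cut, joined once -- a two-stage mark-then-slice algorithm instead of A's single per-character branch with quadratic string re-concatenation.
import Mathlib
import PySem

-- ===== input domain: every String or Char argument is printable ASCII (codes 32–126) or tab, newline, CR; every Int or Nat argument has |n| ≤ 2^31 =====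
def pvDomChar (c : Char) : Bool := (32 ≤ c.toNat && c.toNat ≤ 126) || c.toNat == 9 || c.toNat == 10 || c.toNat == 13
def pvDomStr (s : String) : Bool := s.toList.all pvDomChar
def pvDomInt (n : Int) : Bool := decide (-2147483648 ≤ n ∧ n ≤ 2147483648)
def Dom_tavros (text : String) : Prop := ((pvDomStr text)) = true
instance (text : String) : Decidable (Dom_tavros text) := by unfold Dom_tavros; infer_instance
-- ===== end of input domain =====

-- B is a two-stage mark-then-slice algorithm (compute cut positions, then join uppercased
-- slices with a lowercased char at each cut) instead of A's per-character branch with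
-- quadratic string re-concatenation (objective: faster, measured).
-- Pre_ excludes strings of length < 2, on which A raises IndexError (text[0]/text[1]); B raises there too.

-- ===== PORT A =====
-- loop body of A: append the lower/upper-cased character depending on the 2-char slice text[i-2:i]
def pvStepA (cs : List Char) (acc : List Char) (i : Int) : List Char :=
  if PySem.List.slice cs (some (i - 2)) (some i) = ['.', ' '] ∨
     PySem.List.slice cs (some (i - 2)) (some i) = [',', ' '] then
    acc ++ [PySem.Chars.lowerChar (PySem.List.pyGetD cs i ' ')]
  else
    acc ++ [PySem.Chars.upperChar (PySem.List.pyGetD cs i ' ')]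

def tavros (text : String) : String :=
  let cs := text.toList
  let init : List Char :=
    [PySem.Chars.lowerChar (PySem.List.pyGetD cs 0 ' '), PySem.Chars.upperChar (PySem.List.pyGetD cs 1 ' ')]
  String.ofList ((PySem.List.pyRange 2 (cs.length : Int) 1).foldl (pvStepA cs) init)

-- ===== PORT B =====
-- stage 1 of B: the cut positions j+2 for j with text[j] in '.,' and text[j+1] == ' '
def pvCuts (cs : List Char) : List Int :=
  (PySem.List.pyRange 0 ((cs.length : Int) - 2) 1).filterMap (fun j =>
    if PySem.List.pyGetD cs j ' ' ∈ ['.', ','] ∧ PySem.List.pyGetD cs (j + 1) ' ' = ' '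
    then some (j + 2) else none)

-- stage-2 loop body of B: append the uppercased slice text[prev:i] and the lowercased text[i]
def pvStepB (cs : List Char) (st : List (List Char) × Int) (i : Int) : List (List Char) × Int :=
  (st.1 ++ [(PySem.List.slice cs (some st.2) (some i)).map PySem.Chars.upperChar]
        ++ [[PySem.Chars.lowerChar (PySem.List.pyGetD cs i ' ')]], i + 1)

def tavros_alt (text : String) : String :=
  let cs := text.toList
  let st := (pvCuts cs).foldl (pvStepB cs)
      ([[PySem.Chars.lowerChar (PySem.List.pyGetD cs 0 ' ')],
        [PySem.Chars.upperChar (PySem.List.pyGetD cs 1 ' ')]], (2 : Int))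
  String.ofList ((st.1 ++ [(PySem.List.slice cs (some st.2) none).map PySem.Chars.upperChar]).flatten)

-- ===== PRECONDITION & SPEC =====
-- A raises IndexError on strings of length 0 or 1 (text[0] / text[1]); Pre_ excludes exactly those.
def Pre_tavros (text : String) : Prop := 2 ≤ text.toList.length
instance (text : String) : Decidable (Pre_tavros text) := by unfold Pre_tavros; infer_instance
def pvWitness_tavros : String := "a. b"

def Spec_tavros (text : String) (out : String) : Prop := out = tavros_alt text
instance (text : String) (out : String) : Decidable (Spec_tavros text out) := by unfold Spec_tavros; infer_instance

-- ===== CLAIM (what is proved, stated in full; the proofs are below) =====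
def Claim_equal_tavros : Prop := ∀ (text : String), Dom_tavros text → Pre_tavros text → Spec_tavros text (tavros text)

-- ===== LEMMAS AND PROOFS =====

-- the intended character at position j of the output
def pvG (cs : List Char) (j : Nat) : Char :=
  if j = 0 then PySem.Chars.lowerChar (cs.getD 0 ' ')
  else if j = 1 then PySem.Chars.upperChar (cs.getD 1 ' ')
  else if cs.getD (j - 1) ' ' = ' ' ∧ (cs.getD (j - 2) ' ' = '.' ∨ cs.getD (j - 2) ' ' = ',')
  then PySem.Chars.lowerChar (cs.getD j ' ')
  else PySem.Chars.upperChar (cs.getD j ' ')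

-- Boolean form of the cut condition at an absolute position i ≥ 2
def pvCond (cs : List Char) (i : Nat) : Bool :=
  (cs.getD (i - 1) ' ' == ' ') && (cs.getD (i - 2) ' ' == '.' || cs.getD (i - 2) ' ' == ',')

-- recursive description of B's stage-2 loop
def pvSeg (cs : List Char) : List Int → Int → List Char
  | [], p => (PySem.List.slice cs (some p) none).map PySem.Chars.upperChar
  | i :: rest, p =>
      (PySem.List.slice cs (some p) (some i)).map PySem.Chars.upperChar
        ++ PySem.Chars.lowerChar (PySem.List.pyGetD cs i ' ') :: pvSeg cs rest (i + 1)

lemma pv_slice_pair (cs : List Char) (n : Nat) (h2 : 2 ≤ n) (hn : n ≤ cs.length) :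
    PySem.List.slice cs (some ((n : Int) - 2)) (some (n : Int)) =
      [cs.getD (n - 2) ' ', cs.getD (n - 1) ' '] := by
  have hcast : ((n : Int) - 2) = ((n - 2 : Nat) : Int) := by omega
  rw [hcast, PySem.List.slice_natCast]
  have h1 : n - 2 < cs.length := by omega
  have h2' : n - 1 < cs.length := by omega
  have ht : n - (n - 2) = 2 := by omega
  have hd1 : List.drop (n - 2) cs = cs[n - 2] :: List.drop (n - 1) cs := by
    rw [List.drop_eq_getElem_cons h1, (by omega : n - 2 + 1 = n - 1)]
  have hd2 : List.drop (n - 1) cs = cs[n - 1] :: List.drop n cs := by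
    rw [List.drop_eq_getElem_cons h2', (by omega : n - 1 + 1 = n)]
  rw [ht, hd1, hd2]
  simp [List.getD, List.getElem?_eq_getElem h1, List.getElem?_eq_getElem h2']

lemma pv_foldA (cs : List Char) (n : Nat) (h2 : 2 ≤ n) (hn : n ≤ cs.length) :
    (PySem.List.pyRange 2 (n : Int) 1).foldl (pvStepA cs) [pvG cs 0, pvG cs 1] =
      (List.range n).map (pvG cs) := by
  induction n, h2 using Nat.le_induction with
  | base =>
      rw [PySem.List.pyRange_one_eq_nil (by norm_num)]
      simp [List.range_succ]
  | succ n hn2 ih =>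
      have hcast : ((n + 1 : Nat) : Int) = (n : Int) + 1 := by push_cast; ring
      rw [hcast, PySem.List.pyRange_one_succ_right (by exact_mod_cast hn2.trans (Nat.le_refl n) |>.trans (by omega) : (2:Int) ≤ (n:Int)), List.foldl_append, ih (by omega)]
      have hcond := pv_slice_pair cs n hn2 (by omega)
      unfold pvStepA
      have hget : PySem.List.pyGetD cs (n : Int) ' ' = cs.getD n ' ' := by
        simp [PySem.List.pyGetD_natCast]
      rw [List.foldl_cons, List.foldl_nil, List.range_succ, List.map_append]
      by_cases hC : cs.getD (n - 1) ' ' = ' ' ∧ (cs.getD (n - 2) ' ' = '.' ∨ cs.getD (n - 2) ' ' = ',')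
      · rw [if_pos]
        · simp only [List.map_cons, List.map_nil]
          congr 1
          rw [hget]
          simp only [pvG]
          rw [if_neg (by omega : ¬ n = 0), if_neg (by omega : ¬ n = 1), if_pos hC]
        · rw [hcond]
          rcases hC with ⟨hsp, hpunct⟩
          rcases hpunct with h | h
          · left; rw [h, hsp]
          · right; rw [h, hsp]
      · rw [if_neg]
        · simp only [List.map_cons, List.map_nil]
          congr 1
          rw [hget]
          simp only [pvG]
          rw [if_neg (by omega : ¬ n = 0), if_neg (by omega : ¬ n = 1), if_neg hC]
        · rw [hcond]
          intro h
          apply hC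
          simp only [List.getD] at *
          rcases h with h | h <;> injection h with ha hb <;> injection hb with hb _ <;>
            exact ⟨hb, by simp [ha]⟩

-- B's foldl over cuts, flattened, is pvSeg
lemma pv_fold_seg (cs : List Char) (cuts : List Int) :
    ∀ (ps : List (List Char)) (p : Int),
      ((cuts.foldl (pvStepB cs) (ps, p)).1 ++
          [(PySem.List.slice cs (some (cuts.foldl (pvStepB cs) (ps, p)).2) none).map
            PySem.Chars.upperChar]).flatten
        = ps.flatten ++ pvSeg cs cuts p := by
  induction cuts with
  | nil => intro ps p; simp [pvSeg]
  | cons i rest ih =>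
      intro ps p
      rw [List.foldl_cons]
      show ((rest.foldl (pvStepB cs) (pvStepB cs (ps, p) i)).1 ++ _).flatten = _
      have : pvStepB cs (ps, p) i =
          (ps ++ [(PySem.List.slice cs (some p) (some i)).map PySem.Chars.upperChar]
              ++ [[PySem.Chars.lowerChar (PySem.List.pyGetD cs i ' ')]], i + 1) := rfl
      rw [this, ih]
      simp [pvSeg, List.append_assoc]

-- the cut list is the filtered absolute positions, cast to Int
lemma pv_filterMap (cs : List Char) (l : List Nat) :
    l.filterMap (fun k : Nat =>
        if PySem.List.pyGetD cs ((k : Int)) ' ' ∈ ['.', ','] ∧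
           PySem.List.pyGetD cs ((k : Int) + 1) ' ' = ' '
        then some ((k : Int) + 2) else none)
      = ((l.map (fun k => k + 2)).filter (pvCond cs)).map (fun i : Nat => (i : Int)) := by
  induction l with
  | nil => rfl
  | cons k rest ih =>
      rw [List.filterMap_cons, List.map_cons, List.filter_cons]
      have hg0 : PySem.List.pyGetD cs ((k : Int)) ' ' = cs.getD k ' ' := by
        simp [PySem.List.pyGetD_natCast]
      have hg1 : PySem.List.pyGetD cs ((k : Int) + 1) ' ' = cs.getD (k + 1) ' ' := by
        rw [(by push_cast; ring : ((k : Int) + 1) = ((k + 1 : Nat) : Int)), PySem.List.pyGetD_natCast]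
      have he1 : k + 2 - 1 = k + 1 := by omega
      have he2 : k + 2 - 2 = k := by omega
      by_cases hC : cs.getD k ' ' ∈ ['.', ','] ∧ cs.getD (k + 1) ' ' = ' '
      · rw [if_pos (by rw [hg0, hg1]; exact hC)]
        have hb : pvCond cs (k + 2) = true := by
          simp only [pvCond, he1, he2, Bool.and_eq_true, Bool.or_eq_true, beq_iff_eq]
          rcases hC with ⟨hp, hs⟩
          simp only [List.mem_cons, List.not_mem_nil, or_false] at hp
          exact ⟨hs, hp⟩
        rw [if_pos hb]
        simp only [List.map_cons]
        rw [ih]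
        norm_cast
      · rw [if_neg (by rw [hg0, hg1]; exact hC)]
        have hb : ¬ pvCond cs (k + 2) = true := by
          simp only [pvCond, he1, he2, Bool.and_eq_true, Bool.or_eq_true, beq_iff_eq]
          intro h
          refine hC ⟨?_, h.1⟩
          simp only [List.mem_cons, List.not_mem_nil, or_false]
          exact h.2
        rw [if_neg hb, ih]

lemma pv_cuts_eq (cs : List Char) (h2 : 2 ≤ cs.length) :
    pvCuts cs = ((List.range' 2 (cs.length - 2)).filter (pvCond cs)).map (fun i : Nat => (i : Int)) := by
  unfold pvCuts
  have hr : PySem.List.pyRange 0 ((cs.length : Int) - 2) 1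
      = (List.range (cs.length - 2)).map (fun k : Nat => (k : Int)) := by
    rw [PySem.List.pyRange_one]
    have : (((cs.length : Int) - 2) - 0).toNat = cs.length - 2 := by omega
    rw [this]
    apply List.map_congr_left
    intro k _
    omega
  rw [hr, List.filterMap_map]
  have : (List.range (cs.length - 2)).map (fun k => k + 2) = List.range' 2 (cs.length - 2) := by
    rw [List.range'_eq_map_range]
    apply List.map_congr_left
    intro k _
    omega
  rw [← this, ← pv_filterMap cs]
  simp only [Function.comp]

-- pvSeg at a non-cut position peels one uppercased character
lemma pv_seg_shift (cs : List Char) (cuts : List Int) (p : Nat) (hp : p < cs.length)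
    (hc : ∀ i ∈ cuts, (p : Int) < i) :
    pvSeg cs cuts (p : Int)
      = PySem.Chars.upperChar (cs.getD p ' ') :: pvSeg cs cuts ((p : Int) + 1) := by
  have hp1 : ((p : Int) + 1) = ((p + 1 : Nat) : Int) := by push_cast; ring
  have hdrop : List.drop p cs = cs[p] :: List.drop (p + 1) cs := List.drop_eq_getElem_cons hp
  have hgd : cs.getD p ' ' = cs[p] := List.getD_eq_getElem cs ' ' hp
  cases cuts with
  | nil =>
      simp only [pvSeg]
      rw [hgd, hp1, PySem.List.slice_from_natCast, PySem.List.slice_from_natCast, hdrop,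
        List.map_cons]
  | cons i rest =>
      have hi : (p : Int) < i := hc i (List.mem_cons_self ..)
      simp only [pvSeg]
      rw [hgd, hp1, PySem.List.slice_toNat _ (by omega : (0:Int) ≤ ((p+1:Nat):Int)) (by omega : (0:Int) ≤ i),
        PySem.List.slice_toNat _ (by omega : (0:Int) ≤ ((p:Nat):Int)) (by omega : (0:Int) ≤ i)]
      have h1 : ((p : Nat) : Int).toNat = p := by omega
      have h2 : (((p + 1 : Nat) : Int)).toNat = p + 1 := by omega
      rw [h1, h2, hdrop]
      have h3 : i.toNat - p = (i.toNat - (p + 1)) + 1 := by omega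
      rw [h3, List.take_succ_cons, List.map_cons, List.cons_append]

-- pvSeg over the filtered cut positions produces the intended characters
lemma pv_build (cs : List Char) :
    ∀ (m p : Nat), 2 ≤ p → p + m = cs.length →
      pvSeg cs (((List.range' p m).filter (pvCond cs)).map (fun i : Nat => (i : Int))) (p : Int)
        = (List.range' p m).map (pvG cs) := by
  intro m
  induction m with
  | zero =>
      intro p _ hpn
      simp only [List.range'_zero, List.filter_nil, List.map_nil, pvSeg]
      rw [PySem.List.slice_from_natCast]
      have hd : List.drop p cs = [] := by rw [List.drop_eq_nil_iff]; omega
      rw [hd]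
      rfl
  | succ m ih =>
      intro p hp2 hpn
      rw [List.range'_succ, List.filter_cons, List.map_cons]
      have hplen : p < cs.length := by omega
      by_cases hc : pvCond cs p = true
      · rw [if_pos hc]
        simp only [List.map_cons, pvSeg]
        have hslice : PySem.List.slice cs (some (p : Int)) (some (p : Int)) = [] := by
          rw [PySem.List.slice_natCast]
          simp
        have hcast : ((p : Int) + 1) = ((p + 1 : Nat) : Int) := by push_cast; ring
        rw [hslice, hcast, ih (p + 1) (by omega) (by omega)]
        simp only [List.map_nil, List.nil_append]
        congr 1
        have hg : PySem.List.pyGetD cs (p : Int) ' ' = cs.getD p ' ' := by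
          simp [PySem.List.pyGetD_natCast]
        rw [hg]
        simp only [pvG]
        rw [if_neg (by omega : ¬ p = 0), if_neg (by omega : ¬ p = 1), if_pos]
        simp only [pvCond, Bool.and_eq_true, Bool.or_eq_true, beq_iff_eq] at hc
        exact ⟨hc.1, by rcases hc.2 with h | h <;> [left; right] <;> exact h⟩
      · rw [if_neg hc]
        have hmem : ∀ i ∈ ((List.range' (p+1) m).filter (pvCond cs)).map (fun i : Nat => (i : Int)),
            (p : Int) < i := by
          intro i hi
          rcases List.mem_map.mp hi with ⟨j, hj, rfl⟩
          have := List.mem_range'_1.mp (List.mem_filter.mp hj).1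
          omega
        rw [pv_seg_shift cs _ p hplen hmem]
        have hcast : ((p : Int) + 1) = ((p + 1 : Nat) : Int) := by push_cast; ring
        rw [hcast, ih (p + 1) (by omega) (by omega)]
        congr 1
        simp only [pvG]
        rw [if_neg (by omega : ¬ p = 0), if_neg (by omega : ¬ p = 1), if_neg]
        intro h
        apply hc
        simp only [pvCond, Bool.and_eq_true, Bool.or_eq_true, beq_iff_eq]
        exact ⟨h.1, h.2⟩

-- ===== VERDICT (by name: the statement is the Claim_ definition above) =====
theorem tavros_spec : Claim_equal_tavros := by
  intro text _hdom hpre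
  unfold Spec_tavros tavros tavros_alt
  set cs := text.toList with hcs
  have hlen : 2 ≤ cs.length := hpre
  have hG1 : PySem.List.pyGetD cs (1 : Int) ' ' = cs.getD 1 ' ' := by
    rw [(by norm_num : (1 : Int) = ((1 : Nat) : Int)), PySem.List.pyGetD_natCast]
  have hinit : [PySem.Chars.lowerChar (PySem.List.pyGetD cs 0 ' '), PySem.Chars.upperChar (PySem.List.pyGetD cs 1 ' ')] =
      [pvG cs 0, pvG cs 1] := by
    simp [pvG, PySem.List.pyGetD_zero, hG1]
  simp only
  rw [hinit, pv_foldA cs cs.length hlen (Nat.le_refl _)]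
  rw [pv_fold_seg cs (pvCuts cs)
      [[PySem.Chars.lowerChar (PySem.List.pyGetD cs 0 ' ')], [PySem.Chars.upperChar (PySem.List.pyGetD cs 1 ' ')]] 2]
  rw [pv_cuts_eq cs hlen, (by norm_num : (2 : Int) = ((2 : Nat) : Int)),
    pv_build cs (cs.length - 2) 2 (Nat.le_refl _) (by omega)]
  congr 1
  have hsplit : List.range cs.length = List.range' 0 2 ++ List.range' 2 (cs.length - 2) := by
    have h := List.range'_append (s := 0) (m := 2) (n := cs.length - 2) (step := 1)
    norm_num at h
    rw [List.range_eq_range',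
      (show List.range' 0 cs.length = List.range' 0 (2 + (cs.length - 2)) by
        rw [(by omega : 2 + (cs.length - 2) = cs.length)]), ← h]
  rw [hsplit, List.map_append]
  simp [pvG, PySem.List.pyGetD_zero, hG1, List.range'_succ]
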